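-- pv_equiv track=rewrite | github.com/Labpro-21/if1210-2024-tubes-k07-f | src/battle.py | userPot
-- ===== SOURCE A (Python) =====
-- def userPot(iInv, currentUser):
--     strength = 0
--     resilience = 0
--     healing = 0
--     strengthIndex = 1
--     resilienceIndex = 1
--     healingIndex = 1
--     for i in range(1, len(iInv)):
--         if int(iInv[i][0]) == int(currentUser[0]):
--             if iInv[i][1] == "strength":
--                 strength = int(iInv[i][2])
--                 strengthIndex = i
--             if iInv[i][1] == "resilience":
--                 resilience = int(iInv[i][2])
--                 resilienceIndex = i
--             if iInv[i][1] == "healing":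
--                 healing = int(iInv[i][2])
--                 healingIndex = i
--     currentPot = [strength, resilience, healing]
--     return (currentPot, strengthIndex, resilienceIndex, healingIndex)
-- ===== SOURCE B (Python) =====
-- def userPot(iInv, currentUser):
--     strength = resilience = healing = 0
--     strengthIndex = resilienceIndex = healingIndex = 1
--     if len(iInv) > 1:
--         uid = int(currentUser[0])
--         fS = fR = fH = False
--         for i in range(len(iInv) - 1, 0, -1):
--             row = iInv[i]
--             if int(row[0]) == uid:
--                 cat = row[1]
--                 if cat == "strength" and not fS:
--                     strength = int(row[2])
--                     strengthIndex = i
--                     fS = True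
--                 elif cat == "resilience" and not fR:
--                     resilience = int(row[2])
--                     resilienceIndex = i
--                     fR = True
--                 elif cat == "healing" and not fH:
--                     healing = int(row[2])
--                     healingIndex = i
--                     fH = True
--                 if fS and fR and fH:
--                     break
--     return ([strength, resilience, healing], strengthIndex, resilienceIndex, healingIndex)
-- ===== Notes on version B (the rewrite author's own statement) =====
-- stated objective: alternative
-- what changed: B scans the inventory in reverse with per-category found-flags and an early break (first match from the end wins, = A's forward last-match-wins rescan), computing the user id once before the loop instead of reparsing it every iteration.
import Mathlib
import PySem

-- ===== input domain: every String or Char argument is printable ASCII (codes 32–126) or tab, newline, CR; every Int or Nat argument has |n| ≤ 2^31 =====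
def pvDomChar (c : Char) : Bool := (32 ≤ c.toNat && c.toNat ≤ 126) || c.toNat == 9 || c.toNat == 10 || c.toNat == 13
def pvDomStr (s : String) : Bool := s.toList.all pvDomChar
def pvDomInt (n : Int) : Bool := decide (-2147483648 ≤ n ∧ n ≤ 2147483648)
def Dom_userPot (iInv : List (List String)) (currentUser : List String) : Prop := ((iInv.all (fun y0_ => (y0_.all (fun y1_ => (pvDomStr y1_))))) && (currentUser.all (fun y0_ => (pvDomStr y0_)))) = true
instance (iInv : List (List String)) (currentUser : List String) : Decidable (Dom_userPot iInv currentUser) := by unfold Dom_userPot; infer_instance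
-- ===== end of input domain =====

-- B = reverse scan with per-category found-flags and early break (first match from the end
-- = A's forward last-match); equal to A on Pre_ (the inputs where Python A returns).

-- int(s) with a default; on Pre_ every parse the Pythons perform succeeds, so the default is never the result
def pvInt (s : String) : Int := (PySem.Int.ofStr? s).getD 0

-- ===== PORT A =====
structure StA where
  s : Int
  r : Int
  h : Int
  si : Int
  ri : Int
  hi : Int
deriving DecidableEq, Repr

def stepA (iInv : List (List String)) (currentUser : List String) (st : StA) (i : Int) : StA :=
  if pvInt (PySem.List.pyGetD (PySem.List.pyGetD iInv i []) 0 "") = pvInt (PySem.List.pyGetD currentUser 0 "") then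
    let row := PySem.List.pyGetD iInv i []
    let st := if PySem.List.pyGetD row 1 "" = "strength" then { st with s := pvInt (PySem.List.pyGetD row 2 ""), si := i } else st
    let st := if PySem.List.pyGetD row 1 "" = "resilience" then { st with r := pvInt (PySem.List.pyGetD row 2 ""), ri := i } else st
    if PySem.List.pyGetD row 1 "" = "healing" then { st with h := pvInt (PySem.List.pyGetD row 2 ""), hi := i } else st
  else st

def userPot (iInv : List (List String)) (currentUser : List String) : List Int × Int × Int × Int :=
  let st := (PySem.List.pyRange 1 (iInv.length : Int) 1).foldl (stepA iInv currentUser) ⟨0, 0, 0, 1, 1, 1⟩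
  ([st.s, st.r, st.h], st.si, st.ri, st.hi)

-- ===== PORT B =====
structure StB where
  s : Int
  r : Int
  h : Int
  si : Int
  ri : Int
  hi : Int
  fS : Bool
  fR : Bool
  fH : Bool
deriving DecidableEq, Repr

def loopB (iInv : List (List String)) (uid : Int) : List Int → StB → StB
  | [], st => st
  | i :: rest, st =>
    let row := PySem.List.pyGetD iInv i []
    if pvInt (PySem.List.pyGetD row 0 "") = uid then
      let cat := PySem.List.pyGetD row 1 ""
      let st :=
        if cat = "strength" ∧ st.fS = false then
          { st with s := pvInt (PySem.List.pyGetD row 2 ""), si := i, fS := true }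
        else if cat = "resilience" ∧ st.fR = false then
          { st with r := pvInt (PySem.List.pyGetD row 2 ""), ri := i, fR := true }
        else if cat = "healing" ∧ st.fH = false then
          { st with h := pvInt (PySem.List.pyGetD row 2 ""), hi := i, fH := true }
        else st
      if st.fS && st.fR && st.fH then st else loopB iInv uid rest st
    else loopB iInv uid rest st

def userPot_alt (iInv : List (List String)) (currentUser : List String) : List Int × Int × Int × Int :=
  if 1 < iInv.length then
    let uid := pvInt (PySem.List.pyGetD currentUser 0 "")
    let st := loopB iInv uid (PySem.List.pyRange ((iInv.length : Int) - 1) 0 (-1)) ⟨0, 0, 0, 1, 1, 1, false, false, false⟩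
    ([st.s, st.r, st.h], st.si, st.ri, st.hi)
  else ([0, 0, 0], 1, 1, 1)

-- ===== PRECONDITION & SPEC =====
-- Pre_ = exactly the inputs where Python A returns (no exception): every data row (index ≥ 1)
-- has a parseable id cell, the user's id cell exists and parses, and a row whose id matches the
-- user's has a category cell, with a parseable value cell when the category is one of the three.
def Pre_userPot (iInv : List (List String)) (currentUser : List String) : Prop :=
  ∀ row ∈ iInv.drop 1,
    1 ≤ row.length ∧ (PySem.Int.ofStr? (row.getD 0 "")).isSome ∧
    1 ≤ currentUser.length ∧ (PySem.Int.ofStr? (currentUser.getD 0 "")).isSome ∧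
    (PySem.Int.ofStr? (row.getD 0 "") = PySem.Int.ofStr? (currentUser.getD 0 "") →
      2 ≤ row.length ∧
      ((row.getD 1 "" = "strength" ∨ row.getD 1 "" = "resilience" ∨ row.getD 1 "" = "healing") →
        3 ≤ row.length ∧ (PySem.Int.ofStr? (row.getD 2 "")).isSome))
instance (iInv : List (List String)) (currentUser : List String) : Decidable (Pre_userPot iInv currentUser) := by unfold Pre_userPot; infer_instance

def pvWitness_userPot : List (List String) × List String :=
  ([["id", "cat", "val"], ["1", "strength", "5"], ["2", "healing", "9"]], ["1", "alice"])

def Spec_userPot (iInv : List (List String)) (currentUser : List String) (out : List Int × Int × Int × Int) : Prop := out = userPot_alt iInv currentUser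
instance (iInv : List (List String)) (currentUser : List String) (out : List Int × Int × Int × Int) : Decidable (Spec_userPot iInv currentUser out) := by unfold Spec_userPot; infer_instance

-- ===== CLAIM (what is proved, stated in full; the proofs are below) =====
def Claim_equal_userPot : Prop := ∀ (iInv : List (List String)) (currentUser : List String), Dom_userPot iInv currentUser → Pre_userPot iInv currentUser → Spec_userPot iInv currentUser (userPot iInv currentUser)

-- ===== LEMMAS AND PROOFS =====

-- does index i's row match user id `uid` with category `c`?
def catMatch (iInv : List (List String)) (uid : Int) (c : String) (i : Int) : Bool :=
  pvInt (PySem.List.pyGetD (PySem.List.pyGetD iInv i []) 0 "") == uid &&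
  PySem.List.pyGetD (PySem.List.pyGetD iInv i []) 1 "" == c

def valOf (iInv : List (List String)) (i : Int) : Int :=
  pvInt (PySem.List.pyGetD (PySem.List.pyGetD iInv i []) 2 "")

-- last index in L satisfying p (A's last-match-wins)
def pickLast (p : Int → Bool) : List Int → Option Int
  | [] => none
  | i :: L =>
    match pickLast p L with
    | some j => some j
    | none => if p i then some i else none

def vD (iInv : List (List String)) (o : Option Int) (d : Int) : Int :=
  match o with
  | some i => valOf iInv i
  | none => d

lemma find?_reverse_eq_pickLast (p : Int → Bool) : ∀ (L : List Int), L.reverse.find? p = pickLast p L := by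
  intro L
  induction L with
  | nil => rfl
  | cons i L ih =>
    simp only [List.reverse_cons, List.find?_append, ih, pickLast]
    cases pickLast p L <;> cases hpi : p i <;> simp [List.find?, hpi]

lemma stepA_eq (iInv : List (List String)) (currentUser : List String) (st : StA) (i : Int) :
    stepA iInv currentUser st i =
      { s := if catMatch iInv (pvInt (PySem.List.pyGetD currentUser 0 "")) "strength" i then valOf iInv i else st.s,
        r := if catMatch iInv (pvInt (PySem.List.pyGetD currentUser 0 "")) "resilience" i then valOf iInv i else st.r,
        h := if catMatch iInv (pvInt (PySem.List.pyGetD currentUser 0 "")) "healing" i then valOf iInv i else st.h,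
        si := if catMatch iInv (pvInt (PySem.List.pyGetD currentUser 0 "")) "strength" i then i else st.si,
        ri := if catMatch iInv (pvInt (PySem.List.pyGetD currentUser 0 "")) "resilience" i then i else st.ri,
        hi := if catMatch iInv (pvInt (PySem.List.pyGetD currentUser 0 "")) "healing" i then i else st.hi } := by
  unfold stepA catMatch valOf
  split_ifs <;> simp_all

lemma foldA_eq (iInv : List (List String)) (currentUser : List String) :
    ∀ (L : List Int) (st : StA),
      L.foldl (stepA iInv currentUser) st =
        { s := vD iInv (pickLast (catMatch iInv (pvInt (PySem.List.pyGetD currentUser 0 "")) "strength") L) st.s,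
          r := vD iInv (pickLast (catMatch iInv (pvInt (PySem.List.pyGetD currentUser 0 "")) "resilience") L) st.r,
          h := vD iInv (pickLast (catMatch iInv (pvInt (PySem.List.pyGetD currentUser 0 "")) "healing") L) st.h,
          si := (pickLast (catMatch iInv (pvInt (PySem.List.pyGetD currentUser 0 "")) "strength") L).getD st.si,
          ri := (pickLast (catMatch iInv (pvInt (PySem.List.pyGetD currentUser 0 "")) "resilience") L).getD st.ri,
          hi := (pickLast (catMatch iInv (pvInt (PySem.List.pyGetD currentUser 0 "")) "healing") L).getD st.hi } := by
  intro L
  induction L with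
  | nil => intro st; simp [pickLast, vD]
  | cons i L ih =>
    intro st
    rw [List.foldl_cons, ih, stepA_eq]
    simp only [pickLast]
    cases pickLast (catMatch iInv (pvInt (PySem.List.pyGetD currentUser 0 "")) "strength") L <;>
    cases pickLast (catMatch iInv (pvInt (PySem.List.pyGetD currentUser 0 "")) "resilience") L <;>
    cases pickLast (catMatch iInv (pvInt (PySem.List.pyGetD currentUser 0 "")) "healing") L <;>
      simp only [vD] <;> split_ifs <;> simp

set_option maxHeartbeats 2000000 in
lemma loopB_eq (iInv : List (List String)) (uid : Int) :
    ∀ (M : List Int) (st : StB),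
      loopB iInv uid M st =
        { s := if st.fS then st.s else vD iInv (M.find? (catMatch iInv uid "strength")) st.s,
          r := if st.fR then st.r else vD iInv (M.find? (catMatch iInv uid "resilience")) st.r,
          h := if st.fH then st.h else vD iInv (M.find? (catMatch iInv uid "healing")) st.h,
          si := if st.fS then st.si else (M.find? (catMatch iInv uid "strength")).getD st.si,
          ri := if st.fR then st.ri else (M.find? (catMatch iInv uid "resilience")).getD st.ri,
          hi := if st.fH then st.hi else (M.find? (catMatch iInv uid "healing")).getD st.hi,
          fS := st.fS || (M.find? (catMatch iInv uid "strength")).isSome,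
          fR := st.fR || (M.find? (catMatch iInv uid "resilience")).isSome,
          fH := st.fH || (M.find? (catMatch iInv uid "healing")).isSome } := by
  intro M
  induction M with
  | nil => intro st; cases st; simp [loopB, vD]
  | cons i M ih =>
    intro st
    obtain ⟨sv, rv, hv, siv, riv, hiv, fS, fR, fH⟩ := st
    by_cases hm : pvInt (PySem.List.pyGetD (PySem.List.pyGetD iInv i []) 0 "") = uid
    · have cmi : ∀ c, catMatch iInv uid c i = (PySem.List.pyGetD (PySem.List.pyGetD iInv i []) 1 "" == c) := by
        intro c; simp [catMatch, hm]
      simp only [loopB, if_pos hm, List.find?_cons, cmi]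
      by_cases hcs : PySem.List.pyGetD (PySem.List.pyGetD iInv i []) 1 "" = "strength" <;>
      by_cases hcr : PySem.List.pyGetD (PySem.List.pyGetD iInv i []) 1 "" = "resilience" <;>
      by_cases hch : PySem.List.pyGetD (PySem.List.pyGetD iInv i []) 1 "" = "healing" <;>
      by_cases hfS : fS = true <;> by_cases hfR : fR = true <;> by_cases hfH : fH = true <;>
        simp_all [ih, vD, valOf, beq_false_of_ne]
    · have cmi : ∀ c, catMatch iInv uid c i = false := by
        intro c; simp [catMatch, hm]
      simp only [loopB, if_neg hm, List.find?_cons, cmi]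
      exact ih _

-- ===== VERDICT (by name: the statement is the Claim_ definition above) =====
theorem userPot_spec : Claim_equal_userPot := by
  intro iInv currentUser _ _
  unfold Spec_userPot userPot userPot_alt
  by_cases hlen : 1 < iInv.length
  · simp only [if_pos hlen]
    rw [show PySem.List.pyRange ((iInv.length : Int) - 1) 0 (-1)
          = (PySem.List.pyRange 1 (iInv.length : Int) 1).reverse by
        have := PySem.List.pyRange_neg_one_eq_reverse ((iInv.length : Int) - 1) 0
        simpa using this]
    rw [loopB_eq, foldA_eq]
    simp [find?_reverse_eq_pickLast, vD]
  · have : PySem.List.pyRange 1 (iInv.length : Int) 1 = [] := by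
      apply PySem.List.pyRange_one_eq_nil; omega
    simp [this, if_neg hlen]
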